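-- pv_equiv track=rewrite | github.com/aristotle0x01/6.046J | tadm/notes/chap5_divide_and_conquer/create_sorted_array_through_instructions_1649.py | createSortedArray_ref
-- ===== SOURCE A (Python) =====
-- def createSortedArray_ref(A):
--     m = max(A)
--     c = [0] * (m + 1)
--
--     def update(x):
--         while (x <= m):
--             c[x] += 1
--             x += x & -x
--
--     def get(x):
--         res = 0
--         while (x > 0):
--             res += c[x]
--             x -= x & -x
--         return res
--
--     res = 0
--     for i, a in enumerate(A):
--         res += min(get(a - 1), i - get(a))
--         update(a)
--     return res % (10 ** 9 + 7)
-- ===== SOURCE B (Python) =====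
-- def createSortedArray_ref(A):
--     # Simpler: count, directly among the previously seen elements, how many are
--     # smaller and how many are larger -- no Fenwick tree, no O(max(A)) array.
--     res = 0
--     seen = []
--     for a in A:
--         smaller = sum(1 for b in seen if b < a)
--         larger = sum(1 for b in seen if b > a)
--         res += min(smaller, larger)
--         seen.append(a)
--     return res % (10 ** 9 + 7)
-- ===== Notes on version B (the rewrite author's own statement) =====
-- stated objective: simpler
-- what changed: Replaces the Fenwick (binary indexed) tree over an O(max(A))-sized array with a direct one-pass count of previously seen smaller/larger elements, removing the max(A)-dependent allocation and all bit-trick index arithmetic.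
-- outside the precondition, e.g. on createSortedArray_ref([]): A raises ValueError, B returns 0
import Mathlib
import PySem

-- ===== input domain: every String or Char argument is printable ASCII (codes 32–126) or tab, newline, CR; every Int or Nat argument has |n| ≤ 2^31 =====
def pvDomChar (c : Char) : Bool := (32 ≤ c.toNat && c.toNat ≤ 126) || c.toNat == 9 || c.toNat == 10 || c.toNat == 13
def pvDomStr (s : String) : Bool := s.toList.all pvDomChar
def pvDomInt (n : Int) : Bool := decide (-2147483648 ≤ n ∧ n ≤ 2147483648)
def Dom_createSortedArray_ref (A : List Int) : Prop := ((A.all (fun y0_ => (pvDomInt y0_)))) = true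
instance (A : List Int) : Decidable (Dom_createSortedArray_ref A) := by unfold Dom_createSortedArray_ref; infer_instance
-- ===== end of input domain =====

-- B replaces A's Fenwick (binary indexed) tree over a max(A)-sized array by a direct
-- one-pass count of previously seen smaller/larger elements (simpler; not claimed faster).

-- ===== PORT A =====

-- x & -x (Python's lowbit trick)
def pvLowbit (x : Int) : Int := PySem.Int.band x (-x)

-- `def update(x): while x <= m: c[x] += 1; x += x & -x` — fuel makes the while total;
-- under Pre_ the index x stays in [1, m], so fuel (m+2).toNat is never exhausted.
def pvUpdate (m : Int) : Nat → Int → List Int → List Int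
  | 0, _, c => c
  | fuel+1, x, c =>
      if x ≤ m then
        pvUpdate m fuel (x + pvLowbit x) (PySem.List.pySetD c x (PySem.List.pyGetD c x 0 + 1))
      else c

-- `def get(x): res = 0; while x > 0: res += c[x]; x -= x & -x; return res`
def pvGetSum : Nat → Int → List Int → Int → Int
  | 0, _, _, res => res
  | fuel+1, x, c, res =>
      if 0 < x then pvGetSum fuel (x - pvLowbit x) c (res + PySem.List.pyGetD c x 0)
      else res

-- `for i, a in enumerate(A): res += min(get(a-1), i - get(a)); update(a)`
def pvLoopA (m : Int) (F : Nat) : List Int → Int → List Int → Int → Int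
  | [], _, _, res => res
  | a :: rest, i, c, res =>
      pvLoopA m F rest (i + 1) (pvUpdate m F a c)
        (res + min (pvGetSum F (a - 1) c 0) (i - pvGetSum F a c 0))

def createSortedArray_ref (A : List Int) : Int :=
  match PySem.List.max? A (fun y => y) with
  | none => 0      -- max([]) raises ValueError; excluded by Pre_
  | some m =>
      PySem.Int.mod (pvLoopA m ((m + 2).toNat) A 0 (List.replicate (m + 1).toNat 0) 0)
        (10 ^ 9 + 7)

-- ===== PORT B =====

-- `for a in A: smaller = sum(1 for b in seen if b < a); larger = sum(1 for b in seen if b > a);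
--  res += min(smaller, larger); seen.append(a)`
def pvLoopB : List Int → List Int → Int → Int
  | [], _, res => res
  | a :: rest, seen, res =>
      pvLoopB rest (seen ++ [a])
        (res + min ((seen.countP (fun b => b < a) : Nat) : Int)
                   ((seen.countP (fun b => a < b) : Nat) : Int))

def createSortedArray_ref_alt (A : List Int) : Int :=
  PySem.Int.mod (pvLoopB A [] 0) (10 ^ 9 + 7)

-- ===== PRECONDITION & SPEC =====

-- Pre_ excludes exactly the inputs where the Python A does not return normally:
-- the empty list (max([]) raises ValueError) and lists with an element ≤ 0
-- (update then either loops forever at x = 0 or raises IndexError).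
def Pre_createSortedArray_ref (A : List Int) : Prop := A ≠ [] ∧ ∀ a ∈ A, 1 ≤ a
instance (A : List Int) : Decidable (Pre_createSortedArray_ref A) := by
  unfold Pre_createSortedArray_ref; infer_instance

def pvWitness_createSortedArray_ref : List Int := [2, 1, 2, 3, 1]

def Spec_createSortedArray_ref (A : List Int) (out : Int) : Prop := out = createSortedArray_ref_alt A
instance (A : List Int) (out : Int) : Decidable (Spec_createSortedArray_ref A out) := by
  unfold Spec_createSortedArray_ref; infer_instance

-- ===== CLAIM (what is proved, stated in full; the proofs are below) =====
def Claim_equal_createSortedArray_ref : Prop :=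
  ∀ (A : List Int), Dom_createSortedArray_ref A → Pre_createSortedArray_ref A →
    Spec_createSortedArray_ref A (createSortedArray_ref A)

-- ===== LEMMAS AND PROOFS =====
lemma pv_mul_sub_pred (p q : ℕ) (h : 0 < q) : p * q - p * (q - 1) = p := by
  obtain ⟨t, rfl⟩ : ∃ t, q = t + 1 := ⟨q - 1, by omega⟩
  simp only [Nat.add_sub_cancel, Nat.mul_succ]; omega

lemma pv_land_odd_mul (k q : ℕ) (hq : q % 2 = 1) :
    (2 ^ k * q) &&& (2 ^ k * q - 1) = 2 ^ k * (q - 1) := by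
  have hq1 : 1 ≤ q := by omega
  have hp : 0 < 2 ^ k := Nat.pow_pos (by omega)
  have hmul := pv_mul_sub_pred (2 ^ k) q hq1
  have hle : 2 ^ k * (q - 1) ≤ 2 ^ k * q := Nat.mul_le_mul_left _ (by omega)
  have hsplit : 2 ^ k * q - 1 = 2 ^ k * (q - 1) + (2 ^ k - 1) := by omega
  apply Nat.eq_of_testBit_eq
  intro i
  rw [Nat.testBit_land, hsplit, Nat.testBit_two_pow_mul_add _ (by omega),
      Nat.testBit_two_pow_mul, Nat.testBit_two_pow_mul]
  by_cases hik : i < k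
  · have h1 : ¬ (i ≥ k) := by omega
    simp [hik, h1]
  · have hik' : i ≥ k := by omega
    simp only [if_neg hik, hik', decide_true, Bool.true_and]
    rcases Nat.eq_zero_or_pos (i - k) with hj | hj
    · rw [hj, Nat.testBit_zero, Nat.testBit_zero]
      have h2 : ¬ ((q - 1) % 2 = 1) := by omega
      simp [h2]
    · obtain ⟨j, hj'⟩ : ∃ j, i - k = j + 1 := ⟨i - k - 1, by omega⟩
      rw [hj', Nat.testBit_succ, Nat.testBit_succ]
      have h3 : q / 2 = (q - 1) / 2 := by omega
      rw [h3, Bool.and_self]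

def pvL (n : ℕ) : ℕ := n - (n &&& (n - 1))

lemma pvL_pos {n : ℕ} (h : 0 < n) : 0 < pvL n := by
  have h2 : n &&& (n - 1) ≤ n - 1 := Nat.and_le_right
  unfold pvL; omega

lemma pvL_odd_mul (k q : ℕ) (hq : q % 2 = 1) : pvL (2 ^ k * q) = 2 ^ k := by
  unfold pvL
  rw [pv_land_odd_mul k q hq]
  exact pv_mul_sub_pred _ _ (by omega)

lemma pv_decomp {n : ℕ} (h : 0 < n) : ∃ k q, q % 2 = 1 ∧ n = 2 ^ k * q := by
  obtain ⟨k, m, hm, hn⟩ := Nat.exists_eq_two_pow_mul_odd (n := n) (by omega)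
  exact ⟨k, m, Nat.odd_iff.mp hm, hn⟩

lemma pvL_dvd {n : ℕ} (h : 0 < n) : pvL n ∣ n := by
  obtain ⟨k, q, hq, rfl⟩ := pv_decomp h
  rw [pvL_odd_mul k q hq]; exact Dvd.intro q rfl

lemma pvL_le {n : ℕ} (h : 0 < n) : pvL n ≤ n := Nat.le_of_dvd h (pvL_dvd h)

lemma pvL_double {n : ℕ} (h : 0 < n) : 2 * pvL n ≤ pvL (n + pvL n) := by
  obtain ⟨k, q, hq, rfl⟩ := pv_decomp h
  rw [pvL_odd_mul k q hq]
  obtain ⟨t, ht0, ht1⟩ : ∃ t, 0 < t ∧ q + 1 = 2 * t := ⟨(q + 1) / 2, by omega, by omega⟩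
  obtain ⟨j, q', hq', htq⟩ := pv_decomp ht0
  have he : 2 ^ k * q + 2 ^ k = 2 ^ (k + 1 + j) * q' := by
    calc 2 ^ k * q + 2 ^ k = 2 ^ k * (q + 1) := by ring
    _ = 2 ^ k * (2 * (2 ^ j * q')) := by rw [ht1, htq]
    _ = 2 ^ (k + 1 + j) * q' := by ring
  rw [he, pvL_odd_mul _ _ hq']
  have : 2 ^ (k + 1) ≤ 2 ^ (k + 1 + j) := Nat.pow_le_pow_right (by omega) (by omega)
  calc 2 * 2 ^ k = 2 ^ (k + 1) := by ring
  _ ≤ 2 ^ (k + 1 + j) := this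

lemma pvL_sub {n r : ℕ} (hn : 0 < n) (hr0 : 0 < r) (hr : r < pvL n) :
    pvL (n - r) = pvL r := by
  obtain ⟨k, q, hq, rfl⟩ := pv_decomp hn
  rw [pvL_odd_mul k q hq] at hr
  obtain ⟨j, q2, hq2, rfl⟩ := pv_decomp hr0
  rw [pvL_odd_mul j q2 hq2]
  have hjk : j < k := by
    have h1 : 2 ^ j ≤ 2 ^ j * q2 := Nat.le_mul_of_pos_right _ (by omega)
    have h2 : 2 ^ j < 2 ^ k := by omega
    exact (Nat.pow_lt_pow_iff_right (by omega)).mp h2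
  have hq2lt : q2 < 2 ^ (k - j) * q := by
    have h1 : 2 ^ j * q2 < 2 ^ k * q := by
      have : 2 ^ k ≤ 2 ^ k * q := Nat.le_mul_of_pos_right _ (by omega)
      omega
    have h2 : 2 ^ k = 2 ^ j * 2 ^ (k - j) := by
      rw [← pow_add]; congr 1; omega
    rw [h2, Nat.mul_assoc] at h1
    exact Nat.lt_of_mul_lt_mul_left h1
  have heven : 2 ^ (k - j) * q % 2 = 0 := by
    have : 2 ∣ 2 ^ (k - j) * q := Dvd.dvd.mul_right (dvd_pow_self 2 (by omega)) q
    omega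
  have hkj : (2:ℕ) ^ k * q = 2 ^ j * (2 ^ (k - j) * q) := by
    rw [← Nat.mul_assoc, ← pow_add]
    congr 2; omega
  have hsub : 2 ^ k * q - 2 ^ j * q2 = 2 ^ j * (2 ^ (k - j) * q - q2) := by
    rw [Nat.mul_sub, ← hkj]
  rw [hsub, pvL_odd_mul j _ (by omega)]
lemma pv_lowbit_int (x : Int) (hx : 1 ≤ x) : pvLowbit x = ((pvL x.toNat : ℕ) : Int) := by
  unfold pvLowbit PySem.Int.band
  rw [if_pos (by omega), if_neg (by omega)]
  have h1 : (- -x - 1).toNat = x.toNat - 1 := by omega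
  rw [h1]; rfl

-- the Fenwick update chain a, a + L a, a + L a + L (a + L a), …
inductive pvInChain : ℕ → ℕ → Prop
  | refl (a : ℕ) : pvInChain a a
  | step {a y : ℕ} : pvInChain (a + pvL a) y → pvInChain a y

lemma pv_chain_sub_le {a y : ℕ} (ha : 0 < a) (h : pvInChain a y) :
    y - pvL y ≤ a - pvL a ∧ a ≤ y := by
  induction h with
  | refl => omega
  | @step a y h ih =>
      have h1 := ih (by have := pvL_pos ha; omega)
      have h2 := pvL_double ha
      have h3 := pvL_pos ha
      omega

lemma pv_chain_char {a y : ℕ} (ha : 0 < a) :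
    pvInChain a y ↔ (y - pvL y < a ∧ a ≤ y) := by
  constructor
  · intro h
    have h1 := pv_chain_sub_le ha h
    have h2 := pvL_pos ha
    omega
  · intro h
    have H : ∀ d a, 0 < a → y - pvL y < a → a ≤ y → y - a ≤ d → pvInChain a y := by
      intro d
      induction d with
      | zero =>
          intro a ha h1 h2 h3
          have hay : a = y := by omega
          rw [hay]; exact .refl y
      | succ d ih =>
          intro a ha h1 h2 h3
          by_cases hy : a = y
          · subst hy; exact .refl a
          · have hy0 : 0 < y := by omega
            have hLy := pvL_le hy0
            have hr0 : 0 < y - a := by omega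
            have hr : y - a < pvL y := by omega
            have hLa : pvL a = pvL (y - a) := by
              have hay : a = y - (y - a) := by omega
              conv_lhs => rw [hay]
              rw [pvL_sub hy0 hr0 hr]
            have hLr := pvL_le hr0
            have hLa1 := pvL_pos ha
            exact .step (ih (a + pvL a) (by omega) (by omega) (by omega) (by omega))
    exact H y a ha h.1 h.2 (by omega)

-- pvUpdate preserves the length of c
lemma pv_length_update (m : Int) : ∀ (fuel : ℕ) (x : Int) (c : List Int),
    (pvUpdate m fuel x c).length = c.length := by
  intro fuel
  induction fuel with
  | zero => intro x c; rfl
  | succ fuel ih =>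
      intro x c
      simp only [pvUpdate]
      split
      · rw [ih]; exact PySem.List.length_pySetD c x _
      · rfl

-- per-cell effect of pvUpdate: cell y is incremented exactly on the update chain of a
lemma pv_update_cell : ∀ (fuel : ℕ) (a : ℕ) (c : List Int) (y m : ℕ),
    0 < a → 0 < y → y ≤ m → m < a + fuel → c.length = m + 1 →
    PySem.List.pyGetD (pvUpdate (m : Int) fuel (a : Int) c) (y : Int) 0
      = PySem.List.pyGetD c (y : Int) 0
        + (if y - pvL y < a ∧ a ≤ y then 1 else 0) := by
  intro fuel
  induction fuel with
  | zero =>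
      intro a c y m ha hy hym hm hlen
      have h0 : (if y - pvL y < a ∧ a ≤ y then (1:Int) else 0) = 0 := if_neg (by omega)
      rw [h0]
      simp [pvUpdate]
  | succ fuel ih =>
      intro a c y m ha hy hym hm hlen
      simp only [pvUpdate]
      by_cases ham : a ≤ m
      · rw [if_pos (by exact_mod_cast ham)]
        have hbit : pvLowbit (a : Int) = ((pvL a : ℕ) : Int) := by
          rw [pv_lowbit_int _ (by exact_mod_cast ha)]
          congr 1
        have hLa := pvL_pos ha
        have hcast : ((a : ℕ) : Int) + pvLowbit (a : Int) = (((a + pvL a : ℕ)) : Int) := by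
          rw [hbit]; push_cast; ring
        rw [hcast]
        set c2 := PySem.List.pySetD c (a : Int) (PySem.List.pyGetD c (a : Int) 0 + 1) with hc2
        have hlen' : c2.length = m + 1 := by
          rw [hc2, PySem.List.length_pySetD]; exact hlen
        rw [ih (a + pvL a) c2 y m (by omega) hy hym (by omega) hlen']
        have hset := PySem.List.pyGetD_pySetD_natCast c a y (PySem.List.pyGetD c (a : Int) 0 + 1) 0 (by omega)
        rw [hc2, hset]
        by_cases hya : y = a
        · subst hya
          have hT : y - pvL y < y ∧ y ≤ y := ⟨by omega, le_refl y⟩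
          have hF : ¬ (y - pvL y < y + pvL y ∧ y + pvL y ≤ y) := by omega
          rw [if_pos hT, if_neg hF, if_pos (rfl : y = y)]
          ring
        · have hiff : (y - pvL y < a + pvL a ∧ a + pvL a ≤ y) ↔ (y - pvL y < a ∧ a ≤ y) := by
            rw [← pv_chain_char (by omega), ← pv_chain_char ha]
            constructor
            · exact fun h => .step h
            · intro h
              cases h with
              | refl => exact absurd rfl hya
              | step h' => exact h'
          by_cases hC : y - pvL y < a ∧ a ≤ y
          · rw [if_neg hya, if_pos hC, if_pos (hiff.mpr hC)]
          · rw [if_neg hya, if_neg hC, if_neg (fun h => hC (hiff.mp h))]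
      · rw [if_neg (by exact_mod_cast ham), if_neg (by omega)]
        ring

-- get as a pure spec over ℕ
def pvGspec (c : List Int) (y : ℕ) : Int :=
  if y = 0 then 0 else PySem.List.pyGetD c (y : Int) 0 + pvGspec c (y - pvL y)
termination_by y
decreasing_by have := pvL_pos (Nat.pos_of_ne_zero (by assumption)); omega

lemma pv_getsum_eq : ∀ (fuel : ℕ) (y : ℕ) (c : List Int) (res : Int), y < fuel →
    pvGetSum fuel (y : Int) c res = res + pvGspec c y := by
  intro fuel
  induction fuel with
  | zero => intro y c res h; omega
  | succ fuel ih =>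
      intro y c res h
      simp only [pvGetSum]
      by_cases hy : y = 0
      · subst hy
        have hz : pvGspec c 0 = 0 := by simp [pvGspec]
        rw [if_neg (by omega), hz]
        ring
      · have hy0 : 0 < y := Nat.pos_of_ne_zero hy
        have hLp := pvL_pos hy0
        have hLe := pvL_le hy0
        rw [if_pos (by exact_mod_cast hy0)]
        have hbit : pvLowbit (y : Int) = ((pvL y : ℕ) : Int) := by
          rw [pv_lowbit_int _ (by exact_mod_cast hy0)]
          congr 1
        have hcast : ((y : ℕ) : Int) - pvLowbit (y : Int) = (((y - pvL y : ℕ)) : Int) := by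
          rw [hbit]; omega
        rw [hcast, ih (y - pvL y) c _ (by omega)]
        conv_rhs => rw [pvGspec]
        rw [if_neg hy]
        ring

lemma pv_gspec_update {m a : ℕ} {c c' : List Int} (ha : 0 < a)
    (hcell : ∀ y : ℕ, 0 < y → y ≤ m →
      PySem.List.pyGetD c' (y : Int) 0
        = PySem.List.pyGetD c (y : Int) 0 + (if y - pvL y < a ∧ a ≤ y then 1 else 0)) :
    ∀ y, y ≤ m → pvGspec c' y = pvGspec c y + (if a ≤ y then 1 else 0) := by
  intro y
  induction y using Nat.strong_induction_on with
  | _ y ih =>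
    intro hym
    by_cases hy : y = 0
    · subst hy
      have hz1 : pvGspec c' 0 = 0 := by simp [pvGspec]
      have hz2 : pvGspec c 0 = 0 := by simp [pvGspec]
      rw [hz1, hz2, if_neg (by omega)]
      ring
    · have hy0 : 0 < y := Nat.pos_of_ne_zero hy
      have hLp := pvL_pos hy0
      have hLe := pvL_le hy0
      conv_lhs => rw [pvGspec]
      conv_rhs => rw [pvGspec]
      rw [if_neg hy, hcell y hy0 hym, ih (y - pvL y) (by omega) (by omega)]
      split_ifs <;> omega

lemma pv_getD_replicate (n : ℕ) (i : Int) :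
    PySem.List.pyGetD (List.replicate n (0 : Int)) i 0 = 0 := by
  unfold PySem.List.pyGetD
  cases h : PySem.List.pyGet? (List.replicate n (0 : Int)) i with
  | none => rfl
  | some v =>
      have := PySem.List.mem_of_pyGet?_eq_some _ h
      have := List.eq_of_mem_replicate this
      simp [this]

lemma pv_gspec_replicate (n : ℕ) : ∀ y : ℕ, pvGspec (List.replicate n (0 : Int)) y = 0 := by
  intro y
  induction y using Nat.strong_induction_on with
  | _ y ih =>
    by_cases hy : y = 0
    · subst hy; simp [pvGspec]
    · have hy0 : 0 < y := Nat.pos_of_ne_zero hy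
      have hLp := pvL_pos hy0
      rw [pvGspec, if_neg hy, pv_getD_replicate, ih (y - pvL y) (by omega)]
      ring

-- the two loops agree, given the Fenwick invariant
lemma pv_loop_eq (m : ℕ) : ∀ (rest seen c : List Int) (res : Int),
    (∀ b ∈ rest, 1 ≤ b ∧ b ≤ (m : Int)) →
    c.length = m + 1 →
    (∀ y : ℕ, y ≤ m → pvGspec c y = (seen.countP (fun b => b ≤ (y : Int)) : ℤ)) →
    pvLoopA (m : Int) (m + 2) rest ((seen.length : ℕ) : Int) c res = pvLoopB rest seen res := by
  intro rest
  induction rest with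
  | nil => intros; rfl
  | cons a rest ih =>
      intro seen c res hrest hlen hinv
      obtain ⟨ha1, ham⟩ := hrest a List.mem_cons_self
      obtain ⟨aN, rfl⟩ : ∃ n : ℕ, a = (n : Int) := ⟨a.toNat, by omega⟩
      have haN1 : 1 ≤ aN := by omega
      have haNm : aN ≤ m := by omega
      simp only [pvLoopA, pvLoopB]
      have hg1 : pvGetSum (m + 2) ((aN : Int) - 1) c 0 = (seen.countP (fun b => b < (aN : Int)) : ℤ) := by
        have h1 : (aN : Int) - 1 = ((aN - 1 : ℕ) : Int) := by omega
        rw [h1, pv_getsum_eq _ _ _ _ (by omega), hinv (aN - 1) (by omega)]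
        have h2 : ∀ b ∈ seen, (decide (b ≤ ((aN - 1 : ℕ) : Int)) = true) ↔ (decide (b < (aN : Int)) = true) := by
          intro b _; simp; omega
        rw [List.countP_congr h2]
        ring
      have hg2 : pvGetSum (m + 2) (aN : Int) c 0 = (seen.countP (fun b => b ≤ (aN : Int)) : ℤ) := by
        rw [pv_getsum_eq _ _ _ _ (by omega), hinv aN haNm]
        ring
      have hlarger : ((seen.length : ℕ) : Int) - (seen.countP (fun b => b ≤ (aN : Int)) : ℤ)
          = (seen.countP (fun b => (aN : Int) < b) : ℤ) := by
        have hsplit := List.length_eq_countP_add_countP (p := fun b => decide (b ≤ (aN : Int))) (l := seen)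
        have h2 : ∀ b ∈ seen, ((fun x => decide ¬decide (x ≤ (aN : Int)) = true) b = true) ↔ ((fun x => decide ((aN : Int) < x)) b = true) := by
          intro b _; simp
        rw [List.countP_congr h2] at hsplit
        push_cast [hsplit]
        ring
      rw [hg1, hg2, hlarger]
      have hcell : ∀ y : ℕ, 0 < y → y ≤ m →
          PySem.List.pyGetD (pvUpdate (m : Int) (m + 2) (aN : Int) c) (y : Int) 0
            = PySem.List.pyGetD c (y : Int) 0 + (if y - pvL y < aN ∧ aN ≤ y then 1 else 0) :=
        fun y hy0 hym => pv_update_cell (m + 2) aN c y m haN1 hy0 hym (by omega) hlen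
      have hidx : ((seen.length : ℕ) : Int) + 1 = (((seen ++ [(aN : Int)]).length : ℕ) : Int) := by
        simp
      rw [hidx]
      apply ih
      · exact fun b hb => hrest b (List.mem_cons_of_mem _ hb)
      · rw [pv_length_update]; exact hlen
      · intro y hym
        rw [pv_gspec_update haN1 hcell y hym, hinv y hym, List.countP_append]
        have hsing : List.countP (fun b => decide (b ≤ (y : Int))) [(aN : Int)]
            = if aN ≤ y then 1 else 0 := by
          by_cases h : aN ≤ y
          · rw [if_pos h]; simp [List.countP_cons]; omega
          · rw [if_neg h]; simp [List.countP_cons]; omega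
        rw [hsing]
        by_cases h : aN ≤ y
        · rw [if_pos h, if_pos h]; push_cast; ring
        · rw [if_neg h, if_neg h]; push_cast; ring

-- ===== VERDICT (by name: the statement is the Claim_ definition above) =====
theorem createSortedArray_ref_spec : Claim_equal_createSortedArray_ref := by
  intro A hdom hpre
  obtain ⟨hne, hpos⟩ := hpre
  unfold Spec_createSortedArray_ref
  cases hmax : PySem.List.max? A (fun y => y) with
  | none => exact absurd ((PySem.List.max?_eq_none_iff A _).mp hmax) hne
  | some m0 =>
      have hm0A := PySem.List.max?_mem hmax
      have hm01 : 1 ≤ m0 := hpos m0 hm0A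
      have hmaxall := PySem.List.max?_isMax hmax
      obtain ⟨m, rfl⟩ : ∃ n : ℕ, m0 = (n : Int) := ⟨m0.toNat, by omega⟩
      simp only [createSortedArray_ref, createSortedArray_ref_alt, hmax]
      congr 1
      have hF : (((m : ℕ) : Int) + 2).toNat = m + 2 := by omega
      have hC : (((m : ℕ) : Int) + 1).toNat = m + 1 := by omega
      rw [hF, hC]
      have hres := pv_loop_eq m A [] (List.replicate (m + 1) (0 : Int)) 0
        (fun b hb => ⟨hpos b hb, hmaxall b hb⟩)
        (by simp)
        (by intro y hym; simp [pv_gspec_replicate])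
      simpa using hres
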